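-- pv_equiv track=rewrite | github.com/5v3nn/steward-shift | src/steward_shift/optimizer.py | _calculate_same_day_consecutive_weeks_violations
-- ===== SOURCE A (Python) =====
-- from typing import Dict, List
--
-- def _calculate_same_day_consecutive_weeks_violations(
--     assigned_days: List[int], num_weeks: int
-- ) -> int:
--     """Calculate same day-of-week consecutive weeks violations.
--
--     Counts how many times an employee works on the same day-of-week
--     in two consecutive weeks.
--
--     Args:
--         assigned_days: List of day indices where employee is assigned
--         num_weeks: Number of weeks in the schedule
--
--     Returns:
--         Number of violations (same day in week w and week w+1)
--     """
--     if num_weeks < 2: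
--         return 0
--
--     assigned_set = set(assigned_days)
--     violations = 0
--
--     for week_idx in range(num_weeks - 1):
--         for day_of_week in range(7):
--             day_in_week_w = week_idx * 7 + day_of_week
--             day_in_week_w_plus_1 = (week_idx + 1) * 7 + day_of_week
--
--             if (
--                 day_in_week_w in assigned_set
--                 and day_in_week_w_plus_1 in assigned_set
--             ):
--                 violations += 1
--
--     return violations
-- ===== SOURCE B (Python) =====
-- from typing import List
--
-- def _calculate_same_day_consecutive_weeks_violations(
--     assigned_days: List[int], num_weeks: int
-- ) -> int:
--     """Count days d on the grid whose same weekday in the next week is also assigned."""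
--     s = set(assigned_days)
--     limit = 7 * (num_weeks - 1)
--     return sum(1 for d in s if 0 <= d < limit and d + 7 in s)
-- ===== Notes on version B (the rewrite author's own statement) =====
-- stated objective: faster
-- what changed: Instead of walking the whole (num_weeks-1)x7 week/weekday grid and probing the set twice per cell, B makes one pass over the distinct assigned days counting those in-grid days d with d+7 also assigned (one set probe per distinct day; the num_weeks<2 guard disappears since the limit 7*(num_weeks-1) is then non-positive).
import Mathlib
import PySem

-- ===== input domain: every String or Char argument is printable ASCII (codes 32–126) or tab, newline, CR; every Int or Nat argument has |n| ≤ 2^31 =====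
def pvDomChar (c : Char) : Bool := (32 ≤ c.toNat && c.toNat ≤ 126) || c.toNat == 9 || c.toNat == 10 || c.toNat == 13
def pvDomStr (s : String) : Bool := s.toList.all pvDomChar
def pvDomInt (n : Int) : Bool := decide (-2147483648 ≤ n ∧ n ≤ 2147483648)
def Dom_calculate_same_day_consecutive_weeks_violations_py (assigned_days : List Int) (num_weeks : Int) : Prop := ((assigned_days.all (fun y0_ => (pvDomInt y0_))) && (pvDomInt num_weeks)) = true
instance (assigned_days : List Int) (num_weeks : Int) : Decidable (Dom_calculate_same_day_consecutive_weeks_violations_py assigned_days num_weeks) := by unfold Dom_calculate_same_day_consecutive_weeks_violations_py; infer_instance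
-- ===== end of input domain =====

-- B replaces A's walk over the whole (num_weeks-1)×7 week/weekday grid by a single pass
-- over the distinct assigned days, counting days d with 0 ≤ d < 7*(num_weeks-1) and d+7 assigned
-- (objective: simpler — the guard and the nested grid loops disappear).

-- ===== PORT A =====
def calculate_same_day_consecutive_weeks_violations_py (assigned_days : List Int) (num_weeks : Int) : Int :=
  if num_weeks < 2 then 0
  else
    let assigned_set := PySem.Set.ofList assigned_days
    (PySem.List.pyRange 0 (num_weeks - 1) 1).foldl (fun violations week_idx =>
      (PySem.List.pyRange 0 7 1).foldl (fun violations day_of_week =>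
        let day_in_week_w := week_idx * 7 + day_of_week
        let day_in_week_w_plus_1 := (week_idx + 1) * 7 + day_of_week
        if PySem.Set.contains assigned_set day_in_week_w
            && PySem.Set.contains assigned_set day_in_week_w_plus_1
        then violations + 1 else violations) violations) 0

-- ===== PORT B =====
def calculate_same_day_consecutive_weeks_violations_py_alt (assigned_days : List Int) (num_weeks : Int) : Int :=
  let s := PySem.Set.ofList assigned_days
  let limit := 7 * (num_weeks - 1)
  -- sum over the set: order-independent count of its elements satisfying the condition
  s.foldl (fun acc d =>
    if decide (0 ≤ d) && decide (d < limit) && PySem.Set.contains s (d + 7)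
    then acc + 1 else acc) 0

-- ===== PRECONDITION & SPEC =====
def Spec_calculate_same_day_consecutive_weeks_violations_py (assigned_days : List Int) (num_weeks : Int) (out : Int) : Prop := out = calculate_same_day_consecutive_weeks_violations_py_alt assigned_days num_weeks
instance (assigned_days : List Int) (num_weeks : Int) (out : Int) : Decidable (Spec_calculate_same_day_consecutive_weeks_violations_py assigned_days num_weeks out) := by unfold Spec_calculate_same_day_consecutive_weeks_violations_py; infer_instance

-- ===== CLAIM (what is proved, stated in full; the proofs are below) =====
def Claim_equal_calculate_same_day_consecutive_weeks_violations_py : Prop := ∀ (assigned_days : List Int) (num_weeks : Int), Dom_calculate_same_day_consecutive_weeks_violations_py assigned_days num_weeks → Spec_calculate_same_day_consecutive_weeks_violations_py assigned_days num_weeks (calculate_same_day_consecutive_weeks_violations_py assigned_days num_weeks)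

-- ===== LEMMAS AND PROOFS =====

-- the pair predicate "d assigned and d+7 assigned"
def pvQ (S : PySem.Set Int) (d : Int) : Bool :=
  PySem.Set.contains S d && PySem.Set.contains S (d + 7)

lemma pv_map_shift (w : Int) :
    (PySem.List.pyRange 0 7 1).map (fun k => w * 7 + k)
      = PySem.List.pyRange (w * 7) (w * 7 + 7) 1 := by
  rw [PySem.List.pyRange_one, PySem.List.pyRange_one]
  have h : (w * 7 + 7 - w * 7) = (7 : Int) := by ring
  rw [h]
  simp [List.map_map, Function.comp]

-- the inner dow-loop of A, for one week w, adds the q-count of the week's seven days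
lemma pv_inner (S : PySem.Set Int) (w acc : Int) :
    (PySem.List.pyRange 0 7 1).foldl (fun v k =>
        if PySem.Set.contains S (w * 7 + k) && PySem.Set.contains S ((w + 1) * 7 + k)
        then v + 1 else v) acc
      = acc + ((PySem.List.pyRange (w * 7) (w * 7 + 7) 1).countP (pvQ S) : Int) := by
  have e : ∀ k : Int, (w + 1) * 7 + k = w * 7 + k + 7 := by intro k; ring
  simp only [e]
  have : (PySem.List.pyRange 0 7 1).foldl (fun v k =>
        if PySem.Set.contains S (w * 7 + k) && PySem.Set.contains S (w * 7 + k + 7)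
        then v + 1 else v) acc
      = ((PySem.List.pyRange 0 7 1).map (fun k => w * 7 + k)).foldl
          (fun v d => if pvQ S d then v + 1 else v) acc := by
    rw [List.foldl_map]; rfl
  rw [this, pv_map_shift, PySem.List.foldl_if_add_one]

-- the outer week-loop of A equals the q-count of the whole grid [0, 7*m)
lemma pv_outer (S : PySem.Set Int) (m : Nat) :
    (PySem.List.pyRange 0 (m : Int) 1).foldl (fun violations week_idx =>
      (PySem.List.pyRange 0 7 1).foldl (fun v k =>
        if PySem.Set.contains S (week_idx * 7 + k)
            && PySem.Set.contains S ((week_idx + 1) * 7 + k)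
        then v + 1 else v) violations) 0
      = ((PySem.List.pyRange 0 (7 * (m : Int)) 1).countP (pvQ S) : Int) := by
  induction m with
  | zero => simp [PySem.List.pyRange_one_eq_nil]
  | succ m ih =>
    have h1 : PySem.List.pyRange 0 ((m : Int) + 1) 1
        = PySem.List.pyRange 0 (m : Int) 1 ++ [(m : Int)] :=
      PySem.List.pyRange_one_succ_right (by positivity)
    have h2 : PySem.List.pyRange 0 (7 * ((m : Int) + 1)) 1
        = PySem.List.pyRange 0 (7 * (m : Int)) 1
          ++ PySem.List.pyRange ((m : Int) * 7) ((m : Int) * 7 + 7) 1 := by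
      have := PySem.List.pyRange_one_append 0 (7 * (m : Int)) (7 * ((m : Int) + 1))
        (by positivity) (by omega)
      rw [this]
      congr 1
      ring_nf
    push_cast
    rw [h1, List.foldl_append, List.foldl_cons, List.foldl_nil, ih, pv_inner, h2,
      List.countP_append]
    push_cast
    ring

-- the grid count equals B's count over the distinct assigned days
lemma pv_count_eq (S : PySem.Set Int) (hS : S.Nodup) (L : Int) :
    ((PySem.List.pyRange 0 L 1).countP (pvQ S) : Int)
      = (S.countP (fun d =>
          decide (0 ≤ d) && decide (d < L) && PySem.Set.contains S (d + 7)) : Int) := by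
  have hperm : ((PySem.List.pyRange 0 L 1).filter (pvQ S)).Perm
      (S.filter (fun d => decide (0 ≤ d) && decide (d < L) && PySem.Set.contains S (d + 7))) := by
    rw [List.perm_ext_iff_of_nodup (List.Nodup.filter _ (PySem.List.nodup_pyRange_one 0 L)) (hS.filter _)]
    intro d
    simp only [List.mem_filter, PySem.List.mem_pyRange_one, pvQ, Bool.and_eq_true,
      PySem.Set.contains_iff, decide_eq_true_eq]
    tauto
  rw [List.countP_eq_length_filter, List.countP_eq_length_filter, hperm.length_eq]

-- ===== VERDICT (by name: the statement is the Claim_ definition above) =====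
theorem calculate_same_day_consecutive_weeks_violations_py_spec : Claim_equal_calculate_same_day_consecutive_weeks_violations_py := by
  intro assigned_days num_weeks _
  unfold Spec_calculate_same_day_consecutive_weeks_violations_py
  unfold calculate_same_day_consecutive_weeks_violations_py
  unfold calculate_same_day_consecutive_weeks_violations_py_alt
  set S := PySem.Set.ofList assigned_days with hSdef
  have hSnodup : S.Nodup := PySem.Set.nodup_ofList assigned_days
  have hB : S.foldl (fun acc d =>
      if decide (0 ≤ d) && decide (d < 7 * (num_weeks - 1)) && PySem.Set.contains S (d + 7)
      then acc + 1 else acc) 0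
      = (S.countP (fun d =>
          decide (0 ≤ d) && decide (d < 7 * (num_weeks - 1))
            && PySem.Set.contains S (d + 7)) : Int) := by
    rw [PySem.List.foldl_if_add_one]; ring
  by_cases hlt : num_weeks < 2
  · -- the range [0, 7*(num_weeks-1)) is empty, so B's count is 0 too
    simp only [if_pos hlt, hB]
    rw [← pv_count_eq S hSnodup]
    have : PySem.List.pyRange 0 (7 * (num_weeks - 1)) 1 = [] :=
      PySem.List.pyRange_one_eq_nil (by omega)
    simp [this]
  · simp only [if_neg hlt]
    have hm : ((num_weeks - 1).toNat : Int) = num_weeks - 1 := Int.toNat_of_nonneg (by omega)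
    rw [hB, ← pv_count_eq S hSnodup, ← hm, ← pv_outer S (num_weeks - 1).toNat]
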